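-- pv_equiv track=rewrite | github.com/eseabro/my-repository | 2019-2020 School Projects/ESC180 Assignments/lab4.py | prune_ngram_counts
-- ===== SOURCE A (Python) =====
-- def prune_ngram_counts(counts, prune_len):
--     for num in counts:
--         temp = prune_len
--         numbers = counts.get(num)
--         numbers_us = [int(x) for x in numbers[1]]
--         numbers_us.sort()
--         if len(numbers_us) > prune_len:
--             if numbers_us[len(numbers_us)-temp-1] == numbers_us[len(numbers_us)-temp]:
--                 temp += 1
--             for x in numbers_us[0:len(numbers_us)-temp]:
--                 i = numbers[1].index(x)
--                 del numbers[0][i]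
--                 del numbers[1][i]
--             counts[num] = numbers
--     return counts
-- ===== SOURCE B (Python) =====
-- def prune_ngram_counts(counts, prune_len):
--     for numbers in counts.values():
--         b = numbers[1]
--         n = len(b)
--         if n <= prune_len:
--             continue
--         srt = sorted(b)
--         temp = prune_len + (1 if srt[n - prune_len - 1] == srt[n - prune_len] else 0)
--         need = {}
--         for v in srt[:n - temp]:
--             need[v] = need.get(v, 0) + 1
--         new_a, new_b = [], []
--         for x, v in zip(numbers[0], b):
--             if need.get(v, 0) > 0:
--                 need[v] -= 1
--             else:
--                 new_a.append(x)
--                 new_b.append(v)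
--         numbers[0] = new_a
--         numbers[1] = new_b
--     return counts
-- ===== Notes on version B (the rewrite author's own statement) =====
-- stated objective: alternative
-- what changed: A repeatedly calls numbers[1].index(x) and deletes one element from both lists per removed value; B builds a removal counter from the smallest sorted values once and rebuilds both lists in a single pass over zip(numbers[0], numbers[1]). Pre_ excludes duplicate keys, entries with fewer than two value lists and triggering entries with prune_len <= 0 (A raises IndexError), and triggering entries whose two parallel lists have unequal lengths (malformed count table: A deletes by positions found in the second list, so what survives of the first list's surplus is accidental).
-- outside the precondition, e.g. on prune_ngram_counts({'a': [[5], [0, 1]]}, 1): A returns {'a': [[], [1]]}, B returns {'a': [[], []]}; on prune_ngram_counts({'a': [[1, 2, 3], [4, 5]]}, 1): A returns {'a': [[2, 3], [5]]}, B returns {'a': [[2], [5]]}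
import Mathlib
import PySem

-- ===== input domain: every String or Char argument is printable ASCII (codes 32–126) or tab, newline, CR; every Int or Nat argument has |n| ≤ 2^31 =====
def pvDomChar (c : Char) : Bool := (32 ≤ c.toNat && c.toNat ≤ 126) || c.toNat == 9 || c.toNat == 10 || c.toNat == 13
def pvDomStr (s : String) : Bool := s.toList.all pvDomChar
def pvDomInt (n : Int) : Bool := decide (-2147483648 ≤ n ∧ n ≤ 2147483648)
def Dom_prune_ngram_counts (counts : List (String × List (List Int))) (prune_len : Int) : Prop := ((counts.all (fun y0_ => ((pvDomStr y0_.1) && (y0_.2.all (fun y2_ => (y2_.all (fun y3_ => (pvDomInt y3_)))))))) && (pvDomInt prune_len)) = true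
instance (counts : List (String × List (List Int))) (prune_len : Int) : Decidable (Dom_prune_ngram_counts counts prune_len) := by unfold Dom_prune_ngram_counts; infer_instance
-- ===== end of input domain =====

-- B replaces A's repeated `.index`-and-delete pass per key by a removal counter over the sorted
-- values plus a single rebuild pass over zip(numbers[0], numbers[1]) (an alternative algorithm; no
-- speed claimed). Equivalence is about the RETURN value: both Pythons mutate the dict's value lists
-- in place (A deletes, B rebinds fresh lists).

-- ===== PORT A =====
-- one iteration of A's inner loop: i = numbers[1].index(x); del numbers[0][i]; del numbers[1][i]
-- (eraseIdx is exact here: Pre_ guarantees i < length of both lists; index? none = ValueError,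
--  unreachable because x is drawn from a sorted copy of numbers[1])
def pvDelStep (ab : List Int × List Int) (x : Int) : List Int × List Int :=
  match PySem.List.index? ab.2 x with
  | some i => (ab.1.eraseIdx i, ab.2.eraseIdx i)
  | none => ab

-- the body of A's `for num in counts` loop, acting on numbers = counts.get(num)
def pvPruneA (numbers : List (List Int)) (prune_len : Int) : List (List Int) :=
  match numbers with
  | a :: b :: rest =>
    -- numbers_us = sorted([int(x) for x in numbers[1]]); int(x) is the identity on ints
    let numbers_us := PySem.List.sorted (b.map (fun x => x)) (fun x => x) false
    if ((numbers_us.length : Int) > prune_len) then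
      let temp := if PySem.List.pyGet? numbers_us ((numbers_us.length : Int) - prune_len - 1)
                    = PySem.List.pyGet? numbers_us ((numbers_us.length : Int) - prune_len)
                  then prune_len + 1 else prune_len
      let ab := (PySem.List.slice numbers_us (some 0) (some ((numbers_us.length : Int) - temp))).foldl
                  pvDelStep (a, b)
      ab.1 :: ab.2 :: rest
    else numbers
  | _ => numbers   -- Python raises IndexError on numbers[1]; Pre_ excludes

def prune_ngram_counts (counts : List (String × List (List Int))) (prune_len : Int) : List (String × List (List Int)) :=
  -- `for num in counts:` iterates the keys of the dict; `counts[num] = numbers` stores back the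
  -- (in Python: in-place mutated) value, rendered functionally as an insert of the transformed value
  ((PySem.Dict.mk counts).keys.foldl (fun d num =>
      match d.get? num with
      | some numbers => d.insert num (pvPruneA numbers prune_len)
      | none => d) (PySem.Dict.mk counts)).items

-- ===== PORT B =====
-- per-key body of B: sort, removal counter, one rebuild pass over zip(numbers[0], numbers[1])
def pvPruneB (numbers : List (List Int)) (prune_len : Int) : List (List Int) :=
  match numbers with
  | a :: b :: rest =>
    let n := b.length
    if ((n : Int) ≤ prune_len) then numbers
    else
      let srt := PySem.List.sorted b (fun x => x) false
      let temp := prune_len +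
        (if PySem.List.pyGet? srt ((n : Int) - prune_len - 1)
             = PySem.List.pyGet? srt ((n : Int) - prune_len) then 1 else 0)
      -- need = {}; for v in srt[:n-temp]: need[v] = need.get(v, 0) + 1
      let need := (PySem.List.slice srt (some 0) (some ((n : Int) - temp))).foldl
                    (fun d v => d.insert v (d.getD v 0 + 1)) (PySem.Dict.empty : PySem.Dict Int Int)
      -- for x, v in zip(numbers[0], b): skip the first need[v] occurrences of v, keep the rest
      let st := (a.zip b).foldl
        (fun st (p : Int × Int) =>
          if 0 < st.1.getD p.2 0 then (st.1.insert p.2 (st.1.getD p.2 0 - 1), st.2.1, st.2.2)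
          else (st.1, st.2.1 ++ [p.1], st.2.2 ++ [p.2]))
        (need, ([], []))
      st.2.1 :: st.2.2 :: rest
  | _ => numbers   -- unreachable under Pre_ (Python A raises here)

def prune_ngram_counts_alt (counts : List (String × List (List Int))) (prune_len : Int) : List (String × List (List Int)) :=
  counts.map (fun kv => (kv.1, pvPruneB kv.2 prune_len))

-- ===== PRECONDITION & SPEC =====
-- Pre_ excludes: duplicate keys (the association list stands for a Python dict); entries with fewer
-- than two value lists and triggering entries with prune_len ≤ 0 (A raises IndexError on both); and
-- triggering entries whose two parallel lists have unequal lengths (a malformed count table: A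
-- deletes by positions found in the second list, so what survives of the first list's surplus is
-- accidental — see cites).
def Pre_prune_ngram_counts (counts : List (String × List (List Int))) (prune_len : Int) : Prop :=
  (counts.map Prod.fst).Nodup ∧
  ∀ p ∈ counts, 2 ≤ p.2.length ∧
    (prune_len < (((p.2.getD 1 []).length : Int)) →
      1 ≤ prune_len ∧ (p.2.getD 1 []).length = (p.2.getD 0 []).length)
instance (counts : List (String × List (List Int))) (prune_len : Int) : Decidable (Pre_prune_ngram_counts counts prune_len) := by unfold Pre_prune_ngram_counts; infer_instance

def pvWitness_prune_ngram_counts : (List (String × List (List Int))) × Int :=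
  ([("a", [[1, 2, 3], [5, 4, 6]])], 2)

def Spec_prune_ngram_counts (counts : List (String × List (List Int))) (prune_len : Int) (out : List (String × List (List Int))) : Prop := out = prune_ngram_counts_alt counts prune_len
instance (counts : List (String × List (List Int))) (prune_len : Int) (out : List (String × List (List Int))) : Decidable (Spec_prune_ngram_counts counts prune_len out) := by unfold Spec_prune_ngram_counts; infer_instance

-- ===== CLAIM (what is proved, stated in full; the proofs are below) =====
def Claim_equal_prune_ngram_counts : Prop := ∀ (counts : List (String × List (List Int))) (prune_len : Int), Dom_prune_ngram_counts counts prune_len → Pre_prune_ngram_counts counts prune_len → Spec_prune_ngram_counts counts prune_len (prune_ngram_counts counts prune_len)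

-- ===== LEMMAS AND PROOFS =====

-- abstract removal-counter filter: drop the first (c v) pairs with second component v
def pvKeep (c : Int → Int) : List (Int × Int) → List (Int × Int)
  | [] => []
  | p :: z => if 0 < c p.2 then pvKeep (fun u => if u = p.2 then c u - 1 else c u) z
              else p :: pvKeep c z

-- ---- A's dict fold over the keys is the entrywise map, given distinct keys ----
lemma pv_foldA_items (pl : Int) :
    ∀ (rest front : List (String × List (List Int))),
      ((front ++ rest).map Prod.fst).Nodup →
      ((rest.map Prod.fst).foldl (fun d num =>
          match PySem.Dict.get? d num with
          | some numbers => d.insert num (pvPruneA numbers pl)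
          | none => d) (PySem.Dict.mk (front ++ rest))).items
        = front ++ rest.map (fun kv => (kv.1, pvPruneA kv.2 pl)) := by
  intro rest
  induction rest with
  | nil => intro front _; simp
  | cons kv rest ih =>
    intro front hnd
    obtain ⟨k, v⟩ := kv
    have hdisj := List.disjoint_of_nodup_append (by simpa [List.map_append] using hnd)
    have hkfront : ∀ q ∈ front, q.1 ≠ k := fun q hq hqk =>
      hdisj (List.mem_map.mpr ⟨q, hq, hqk⟩) (by simp)
    have hkrest : ∀ q ∈ rest, q.1 ≠ k := by
      intro q hq hqk
      have h2 : (((k, v) :: rest).map Prod.fst).Nodup :=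
        List.Nodup.of_append_right (by simpa [List.map_append] using hnd)
      simp only [List.map_cons, List.nodup_cons] at h2
      exact h2.1 (List.mem_map.mpr ⟨q, hq, hqk⟩)
    have hget : PySem.Dict.get? (PySem.Dict.mk (front ++ (k, v) :: rest)) k = some v := by
      simp only [PySem.Dict.get?, List.find?_append]
      have : front.find? (fun p => p.1 == k) = none := by
        apply List.find?_eq_none.mpr
        intro q hq; simpa using hkfront q hq
      simp [this]
    have hcont : PySem.Dict.contains (PySem.Dict.mk (front ++ (k, v) :: rest)) k = true := by
      simp only [PySem.Dict.contains, List.any_append, List.any_cons]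
      simp
    have hins : PySem.Dict.insert (PySem.Dict.mk (front ++ (k, v) :: rest)) k (pvPruneA v pl)
        = PySem.Dict.mk (front ++ (k, pvPruneA v pl) :: rest) := by
      simp only [PySem.Dict.insert, hcont, if_pos]
      congr 1
      rw [List.map_append, List.map_cons]
      have hf : front.map (fun p => if (p.1 == k) = true then (k, pvPruneA v pl) else p) = front := by
        rw [List.map_congr_left (g := id) (fun q hq => by simp [hkfront q hq]), List.map_id]
      have hr : rest.map (fun p => if (p.1 == k) = true then (k, pvPruneA v pl) else p) = rest := by
        rw [List.map_congr_left (g := id) (fun q hq => by simp [hkrest q hq]), List.map_id]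
      rw [hf, hr]
      simp
    simp only [List.map_cons, List.foldl_cons, hget, hins]
    have hres := ih (front ++ [(k, pvPruneA v pl)]) (by simpa using hnd)
    rw [show front ++ (k, pvPruneA v pl) :: rest
          = (front ++ [(k, pvPruneA v pl)]) ++ rest by simp]
    rw [hres]
    simp

-- ---- one deletion of A = eraseP on the zipped view ----
lemma pv_delStep_eraseP : ∀ (z : List (Int × Int)) (x : Int),
    pvDelStep (z.map Prod.fst, z.map Prod.snd) x
      = ((z.eraseP (fun p => p.2 == x)).map Prod.fst,
         (z.eraseP (fun p => p.2 == x)).map Prod.snd) := by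
  intro z
  induction z with
  | nil => intro x; simp [pvDelStep, PySem.List.index?]
  | cons p z ih =>
    intro x
    by_cases hpx : p.2 = x
    · have h0 : PySem.List.index? (p.2 :: z.map Prod.snd) x = some 0 := by
        rw [hpx]; exact PySem.List.index?_cons_self x (z.map Prod.snd)
      simp only [pvDelStep, List.map_cons, h0]
      simp [hpx]
    · have hidx := PySem.List.index?_cons_of_ne (x := p.2) (v := x) (z.map Prod.snd) hpx
      have ihx := ih x
      cases hfind : PySem.List.index? (z.map Prod.snd) x with
      | none =>
        rw [hfind] at hidx
        simp only [pvDelStep, hfind] at ihx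
        rw [Prod.mk.injEq] at ihx
        simp only [pvDelStep, List.map_cons, hidx, Option.map_none]
        simp [hpx, ← ihx.1, ← ihx.2]
      | some i =>
        rw [hfind] at hidx
        simp only [pvDelStep, hfind] at ihx
        rw [Prod.mk.injEq] at ihx
        simp only [pvDelStep, List.map_cons, hidx, Option.map_some]
        simp [hpx, List.eraseIdx_cons_succ, ihx.1, ihx.2]

-- ---- A's whole deletion loop on the zipped view ----
lemma pv_foldDel_eraseP : ∀ (rem : List Int) (z : List (Int × Int)),
    rem.foldl pvDelStep (z.map Prod.fst, z.map Prod.snd)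
      = ((rem.foldl (fun z x => z.eraseP (fun p => p.2 == x)) z).map Prod.fst,
         (rem.foldl (fun z x => z.eraseP (fun p => p.2 == x)) z).map Prod.snd) := by
  intro rem
  induction rem with
  | nil => intro z; simp
  | cons x rem ih =>
    intro z
    simp only [List.foldl_cons, pv_delStep_eraseP]
    exact ih _

-- ---- counter shift: adding one removal of x = erasing the first pair carrying x ----
lemma pv_keep_bump : ∀ (z : List (Int × Int)) (c : Int → Int) (x : Int), 0 ≤ c x →
    pvKeep (fun u => if u = x then c u + 1 else c u) z
      = pvKeep c (z.eraseP (fun p => p.2 == x)) := by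
  intro z
  induction z with
  | nil => intro c x _; simp [pvKeep]
  | cons p z ih =>
    intro c x hcx
    by_cases hpx : p.2 = x
    · subst hpx
      rw [show (p :: z).eraseP (fun q => q.2 == p.2) = z by simp]
      simp only [pvKeep]
      rw [if_pos (show (0:ℤ) < if True then c p.2 + 1 else c p.2 by simp; omega)]
      congr 1
      funext u
      by_cases hu : u = p.2 <;> simp [hu]
    · rw [show (p :: z).eraseP (fun q => q.2 == x) = p :: z.eraseP (fun q => q.2 == x) by
        simp [hpx]]
      simp only [pvKeep]
      rw [if_neg hpx]
      by_cases hc : 0 < c p.2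
      · rw [if_pos hc, if_pos hc]
        rw [← ih (fun w => if w = p.2 then c w - 1 else c w) x
              (by simpa [Ne.symm hpx] using hcx)]
        congr 1
        funext u
        by_cases hup : u = p.2 <;> by_cases hux : u = x <;> simp_all
      · rw [if_neg hc, if_neg hc]
        rw [ih c x hcx]

-- ---- A's deletion loop = counter filter ----
lemma pv_foldEraseP_keep : ∀ (rem : List Int) (z : List (Int × Int)),
    rem.foldl (fun z x => z.eraseP (fun p => p.2 == x)) z
      = pvKeep (fun v => (rem.count v : Int)) z := by
  intro rem
  induction rem with
  | nil =>
    intro z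
    simp only [List.foldl_nil]
    induction z with
    | nil => simp [pvKeep]
    | cons p z ihz =>
      simp only [pvKeep]
      rw [if_neg (by simp)]
      exact congrArg (List.cons p) ihz
  | cons x rem ih =>
    intro z
    simp only [List.foldl_cons]
    rw [ih]
    rw [← pv_keep_bump _ _ x (by exact Int.natCast_nonneg _)]
    congr 1
    funext v
    by_cases hvx : v = x
    · subst hvx; simp [List.count_cons_self]
    · have hxv : ¬x = v := fun h => hvx h.symm
      simp [hvx, hxv]

-- ---- B's rebuild loop = counter filter ----
lemma pv_foldB_keep : ∀ (z : List (Int × Int)) (d : PySem.Dict Int Int) (na nb : List Int),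
    (z.foldl (fun st (p : Int × Int) =>
        if 0 < st.1.getD p.2 0 then (st.1.insert p.2 (st.1.getD p.2 0 - 1), st.2.1, st.2.2)
        else (st.1, st.2.1 ++ [p.1], st.2.2 ++ [p.2])) (d, na, nb)).2
      = (na ++ (pvKeep (fun v => d.getD v 0) z).map Prod.fst,
         nb ++ (pvKeep (fun v => d.getD v 0) z).map Prod.snd) := by
  intro z
  induction z with
  | nil => intro d na nb; simp [pvKeep]
  | cons p z ih =>
    intro d na nb
    simp only [List.foldl_cons, pvKeep]
    by_cases hc : 0 < d.getD p.2 0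
    · rw [if_pos hc, if_pos hc, ih]
      have : (fun v => (d.insert p.2 (d.getD p.2 0 - 1)).getD v 0)
           = (fun u => if u = p.2 then d.getD u 0 - 1 else d.getD u 0) := by
        funext v
        by_cases hv : v = p.2
        · subst hv; simp [PySem.Dict.getD, PySem.Dict.get?_insert_self]
        · simp [PySem.Dict.getD, PySem.Dict.get?_insert_of_ne d _ hv, hv]
      rw [this]
    · rw [if_neg hc, if_neg hc, ih]
      simp

-- ---- per-entry equivalence ----
lemma pv_prune_entry_eq (v : List (List Int)) (pl : Int)
    (h2 : 2 ≤ v.length)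
    (hok : pl < (((v.getD 1 []).length : Int)) →
      1 ≤ pl ∧ (v.getD 1 []).length = (v.getD 0 []).length) :
    pvPruneA v pl = pvPruneB v pl := by
  match v, h2 with
  | a :: b :: rest, _ =>
    simp only [List.getD_cons_succ, List.getD_cons_zero] at hok
    simp only [pvPruneA, pvPruneB]
    have hmap : b.map (fun x => x) = b := List.map_id' b
    rw [hmap]
    have hlen : (PySem.List.sorted b (fun x => x) false).length = b.length :=
      PySem.List.length_sorted b _ false
    rw [hlen]
    by_cases hguard : (b.length : Int) ≤ pl
    · rw [if_neg (by omega), if_pos hguard]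
    · rw [if_pos (by omega), if_neg hguard]
      obtain ⟨hpl1, hba⟩ := hok (by omega)
      -- the two temp expressions are the same number
      have htemp : (if PySem.List.pyGet? (PySem.List.sorted b (fun x => x) false) ((b.length : Int) - pl - 1)
                      = PySem.List.pyGet? (PySem.List.sorted b (fun x => x) false) ((b.length : Int) - pl)
                    then pl + 1 else pl)
                 = pl + (if PySem.List.pyGet? (PySem.List.sorted b (fun x => x) false) ((b.length : Int) - pl - 1)
                           = PySem.List.pyGet? (PySem.List.sorted b (fun x => x) false) ((b.length : Int) - pl)
                         then 1 else 0) := by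
        split <;> omega
      rw [htemp]
      set srt := PySem.List.sorted b (fun x => x) false with hsrt
      set temp := pl + (if PySem.List.pyGet? srt ((b.length : Int) - pl - 1)
                          = PySem.List.pyGet? srt ((b.length : Int) - pl) then 1 else 0) with htempdef
      set rem := PySem.List.slice srt (some 0) (some ((b.length : Int) - temp)) with hrem
      -- A side through the zipped view (lengths equal: the zip loses nothing)
      have hzsnd : (a.zip b).map Prod.snd = b := List.map_snd_zip (le_of_eq hba)
      have hzfst : (a.zip b).map Prod.fst = a := List.map_fst_zip (le_of_eq hba.symm)
      have hA : rem.foldl pvDelStep (a, b)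
          = ((pvKeep (fun v => (rem.count v : Int)) (a.zip b)).map Prod.fst,
             (pvKeep (fun v => (rem.count v : Int)) (a.zip b)).map Prod.snd) := by
        have hfold := pv_foldDel_eraseP rem (a.zip b)
        rw [hzsnd, hzfst] at hfold
        rw [hfold, pv_foldEraseP_keep]
      -- B side
      have hgetD : (fun v => (rem.foldl (fun d v => d.insert v (d.getD v 0 + 1))
              (PySem.Dict.empty : PySem.Dict Int Int)).getD v 0) = fun v => (rem.count v : Int) := by
        funext v
        rw [PySem.Dict.foldl_insert_getD_add_one_eq_counter]
        exact PySem.Dict.getD_counter rem v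
      have hB := pv_foldB_keep (a.zip b)
        (rem.foldl (fun d v => d.insert v (d.getD v 0 + 1)) (PySem.Dict.empty : PySem.Dict Int Int)) [] []
      rw [hgetD] at hB
      rw [hA, hB]
      simp

-- ===== VERDICT (by name: the statement is the Claim_ definition above) =====
theorem prune_ngram_counts_spec : Claim_equal_prune_ngram_counts := by
  intro counts prune_len _hdom hpre
  obtain ⟨hnd, hent⟩ := hpre
  unfold Spec_prune_ngram_counts prune_ngram_counts prune_ngram_counts_alt
  have hkeys : (PySem.Dict.mk counts).keys = counts.map Prod.fst := rfl
  rw [hkeys]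
  have := pv_foldA_items prune_len counts [] (by simpa using hnd)
  simp only [List.nil_append] at this
  rw [this]
  apply List.map_congr_left
  intro kv hkv
  obtain ⟨h2, hok⟩ := hent kv hkv
  rw [pv_prune_entry_eq kv.2 prune_len h2 hok]
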